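-- pv_equiv track=rewrite | github.com/mikiCode/OpenMeteoDataDownloadForUSTornadoes | api_download.py | get_index_api
-- ===== SOURCE A (Python) =====
-- def get_index_api(search_value):
--     hour_order_api = {
--         0: "00:00",
--         1: "23:00",
--         2: "22:00",
--         3: "21:00",
--         4: "20:00",
--         5: "19:00",
--         6: "18:00",
--         7: "17:00",
--         8: "16:00",
--         9: "15:00",
--         10: "14:00",
--         11: "13:00",
--         12: "12:00",
--         13: "11:00",
--         14: "10:00",
--         15: "09:00",
--         16: "08:00",
--         17: "07:00",
--         18: "06:00",
--         19: "05:00",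
--         20: "04:00",
--         21: "03:00",
--         22: "02:00",
--         23: "01:00",
--     }
--     for key, value in hour_order_api.items():
--         if value[:2] == search_value:
--             return key
--     return None
-- ===== SOURCE B (Python) =====
-- def get_index_api(search_value):
--     if search_value == "00":
--         return 0
--     try:
--         h = int(search_value)
--     except (TypeError, ValueError):
--         return None
--     if 1 <= h <= 23 and f"{h:02d}" == search_value:
--         return 24 - h
--     return None
-- ===== Notes on version B (the rewrite author's own statement) =====
-- stated objective: simpler
-- what changed: Replaces the 24-entry dict and linear scan with direct arithmetic: parse the hour, verify it is the canonical two-digit string, and return 24 - h (0 for "00").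
import Mathlib
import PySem

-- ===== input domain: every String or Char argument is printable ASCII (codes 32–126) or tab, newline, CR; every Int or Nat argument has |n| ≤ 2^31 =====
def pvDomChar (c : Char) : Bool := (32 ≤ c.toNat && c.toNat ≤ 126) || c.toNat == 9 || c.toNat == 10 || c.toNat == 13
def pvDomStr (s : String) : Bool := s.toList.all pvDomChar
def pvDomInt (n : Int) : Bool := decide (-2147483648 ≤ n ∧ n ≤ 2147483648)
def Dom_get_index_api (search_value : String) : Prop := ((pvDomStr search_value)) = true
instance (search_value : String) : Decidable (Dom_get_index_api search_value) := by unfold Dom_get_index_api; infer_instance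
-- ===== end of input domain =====

-- B replaces A's 24-entry dict scan by direct arithmetic (parse the hour, re-check the
-- canonical two-digit form, return 24 - h, or 0 for "00"); objective: simpler.

-- ===== PORT A =====
-- the dict literal, as an association list in insertion order
def hourOrderApi : List (Int × String) :=
  [(0, "00:00"), (1, "23:00"), (2, "22:00"), (3, "21:00"), (4, "20:00"), (5, "19:00"),
   (6, "18:00"), (7, "17:00"), (8, "16:00"), (9, "15:00"), (10, "14:00"), (11, "13:00"),
   (12, "12:00"), (13, "11:00"), (14, "10:00"), (15, "09:00"), (16, "08:00"), (17, "07:00"),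
   (18, "06:00"), (19, "05:00"), (20, "04:00"), (21, "03:00"), (22, "02:00"), (23, "01:00")]

-- the for-loop: first (key, value) with value[:2] == search_value, else None
-- (string equality is compared via .toList, which is exact)
def get_index_api (search_value : String) : Option Int :=
  match hourOrderApi.find?
      (fun kv => (PySem.Str.slice kv.2 none (some 2)).toList == search_value.toList) with
  | some kv => some kv.1
  | none => none

-- ===== PORT B =====
-- f"{h:02d}" as a list of chars (exact for the nonnegative h it is applied to)
def pad2Chars (h : Int) : List Char :=
  let t := PySem.Int.toChars h
  if t.length < 2 then '0' :: t else t

def get_index_api_alt (search_value : String) : Option Int :=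
  if search_value.toList == "00".toList then some 0
  else
    match PySem.Int.ofStr? search_value with
    | none => none                                   -- int(search_value) raised → return None
    | some h =>
      if 1 ≤ h ∧ h ≤ 23 then
        if pad2Chars h == search_value.toList then some (24 - h) else none
      else none

-- ===== PRECONDITION & SPEC =====
def Spec_get_index_api (search_value : String) (out : Option Int) : Prop := out = get_index_api_alt search_value
instance (search_value : String) (out : Option Int) : Decidable (Spec_get_index_api search_value out) := by unfold Spec_get_index_api; infer_instance

-- ===== CLAIM (what is proved, stated in full; the proofs are below) =====
def Claim_equal_get_index_api : Prop := ∀ (search_value : String), Dom_get_index_api search_value → Spec_get_index_api search_value (get_index_api search_value)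

-- ===== LEMMAS AND PROOFS =====

-- the 24 strings A accepts (as char lists)
def hourPrefixes : List (List Char) :=
  ["00","01","02","03","04","05","06","07","08","09","10","11","12",
   "13","14","15","16","17","18","19","20","21","22","23"].map String.toList

theorem pad2Chars_mem (h : Int) (h1 : 1 ≤ h) (h2 : h ≤ 23) : pad2Chars h ∈ hourPrefixes := by
  interval_cases h <;> decide

theorem equal_of_mem (s : String) (hmem : s.toList ∈ hourPrefixes) :
    get_index_api s = get_index_api_alt s := by
  simp only [hourPrefixes, List.map, List.mem_cons, List.not_mem_nil, or_false] at hmem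
  have hs : ∀ l : List Char, s.toList = l → s = String.ofList l := by
    intro l hl; apply String.toList_inj.mp; rw [hl]; simp
  rcases hmem with h|h|h|h|h|h|h|h|h|h|h|h|h|h|h|h|h|h|h|h|h|h|h|h <;>
    rw [hs _ h] <;> decide

theorem equal_of_not_mem (s : String) (hmem : s.toList ∉ hourPrefixes) :
    get_index_api s = get_index_api_alt s := by
  -- A returns none: every table value's 2-char prefix lies in hourPrefixes, and s does not
  have key : ∀ kv ∈ hourOrderApi,
      (PySem.Str.slice kv.2 none (some 2)).toList ∈ hourPrefixes := by decide
  have hA : get_index_api s = none := by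
    rw [get_index_api, List.find?_eq_none.mpr]
    intro kv hkv
    simp only [beq_iff_eq]
    exact fun hc => hmem (hc ▸ key kv hkv)
  -- B returns none: s is not "00", and if int(s) parses to h ∈ [1,23] then the
  -- canonical string pad2Chars h lies in hourPrefixes, hence differs from s
  have hB : get_index_api_alt s = none := by
    rw [get_index_api_alt, if_neg]
    · cases hofs : PySem.Int.ofStr? s with
      | none => rfl
      | some h =>
        simp only []
        by_cases hr : 1 ≤ h ∧ h ≤ 23
        · rw [if_pos hr, if_neg]
          simp only [beq_iff_eq]
          exact fun hc => hmem (hc ▸ pad2Chars_mem h hr.1 hr.2)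
        · rw [if_neg hr]
    · simp only [beq_iff_eq]
      exact fun hc => hmem (hc ▸ (by decide : ("00".toList : List Char) ∈ hourPrefixes))
  rw [hA, hB]

-- ===== VERDICT (by name: the statement is the Claim_ definition above) =====
theorem get_index_api_spec : Claim_equal_get_index_api := by
  intro s _
  unfold Spec_get_index_api
  by_cases hmem : s.toList ∈ hourPrefixes
  · exact equal_of_mem s hmem
  · exact equal_of_not_mem s hmem
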